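-- pv_equiv track=rewrite | github.com/RobinJehn/aoc | 2023/day_22/day_22.py | getBricksThatCanBeRemoved
-- ===== SOURCE A (Python) =====
-- def getBricksThatCanBeRemoved(supports, rests_on):
--     can_be_removed = set()
--     for brick, supportets in supports.items():
--         remove = True
--         for supported in supportets:
--             if len(rests_on[supported]) == 1:
--                 remove = False
--         if remove:
--             can_be_removed.add(brick)
--     return can_be_removed
-- ===== SOURCE B (Python) =====
-- def getBricksThatCanBeRemoved(supports, rests_on):
--     # Reverse index: supported brick -> list of bricks that support it.
--     supported_by = {}
--     for brick, slist in supports.items():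
--         for x in slist:
--             supported_by.setdefault(x, []).append(brick)
--     # A brick is critical if it holds up some brick that rests on exactly one support.
--     critical = set()
--     for x, holders in supported_by.items():
--         if len(rests_on[x]) == 1:
--             critical.update(holders)
--     return set(supports) - critical
-- ===== Notes on version B (the rewrite author's own statement) =====
-- stated objective: alternative
-- what changed: A checks each brick with a nested loop and a per-brick remove flag; B instead builds a reverse index (supported brick -> its supporters), scans that index once to collect the 'critical' supporters of any brick resting on a single support, and returns the key set minus the critical set.
import Mathlib
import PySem

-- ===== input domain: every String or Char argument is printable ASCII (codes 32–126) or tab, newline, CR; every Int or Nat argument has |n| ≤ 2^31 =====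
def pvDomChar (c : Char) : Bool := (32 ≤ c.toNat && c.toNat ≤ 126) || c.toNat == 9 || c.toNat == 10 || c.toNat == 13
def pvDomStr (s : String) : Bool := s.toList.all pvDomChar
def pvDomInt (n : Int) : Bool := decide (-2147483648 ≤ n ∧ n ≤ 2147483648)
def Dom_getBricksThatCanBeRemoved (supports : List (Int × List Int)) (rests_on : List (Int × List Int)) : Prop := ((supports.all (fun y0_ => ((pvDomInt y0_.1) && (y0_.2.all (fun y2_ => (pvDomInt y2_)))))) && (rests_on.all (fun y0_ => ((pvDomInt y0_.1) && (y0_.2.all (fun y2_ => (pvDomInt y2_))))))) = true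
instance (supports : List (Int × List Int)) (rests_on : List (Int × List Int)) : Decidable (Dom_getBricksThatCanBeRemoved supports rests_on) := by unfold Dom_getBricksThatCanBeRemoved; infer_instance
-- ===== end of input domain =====

-- B replaces A's nested loop with per-brick remove flag by: build a reverse index
-- (supported brick -> its supporters), scan it once collecting the 'critical' supporters
-- of bricks resting on exactly one support, and return the key set minus the critical set.
-- Both return a Python set (ported as PySem.Set, compared as a finite set).

-- ===== PORT A =====
def getBricksThatCanBeRemoved (supports : List (Int × List Int)) (rests_on : List (Int × List Int)) : List Int :=
  let rd := PySem.Dict.ofList rests_on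
  (PySem.Dict.ofList supports).items.foldl
    (fun can_be_removed p =>
      let remove := p.2.foldl
        (fun remove supported =>
          match rd.get? supported with
          | some l => if l.length = 1 then false else remove
          | none => remove)   -- unreachable under Pre_: Python raises KeyError here
        true
      if remove then PySem.Set.add can_be_removed p.1 else can_be_removed)
    PySem.Set.empty

-- ===== PORT B =====
def getBricksThatCanBeRemoved_alt (supports : List (Int × List Int)) (rests_on : List (Int × List Int)) : List Int :=
  let sd := PySem.Dict.ofList supports
  let rd := PySem.Dict.ofList rests_on
  -- supported_by.setdefault(x, []).append(brick)  ==  d[x] = d.get(x, []) + [brick]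
  let supported_by := sd.items.foldl
    (fun d p => p.2.foldl (fun d x => d.modify x [] (· ++ [p.1])) d)
    PySem.Dict.empty
  let critical := supported_by.items.foldl
    (fun crit q =>
      match rd.get? q.1 with
      | some l => if l.length = 1 then PySem.Set.update crit q.2 else crit
      | none => crit)   -- unreachable under Pre_: Python raises KeyError here
    PySem.Set.empty
  PySem.Set.diff (PySem.Set.ofList sd.keys) critical

-- ===== PRECONDITION & SPEC =====
-- Pre_ excludes exactly the inputs where the Python raises KeyError (both A and B do): some brick
-- listed as supported (in the dict built from supports) has no entry in rests_on.
def Pre_getBricksThatCanBeRemoved (supports : List (Int × List Int)) (rests_on : List (Int × List Int)) : Prop :=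
  ∀ p ∈ (PySem.Dict.ofList supports).items, ∀ x ∈ p.2, x ∈ rests_on.map (·.1)
instance (supports : List (Int × List Int)) (rests_on : List (Int × List Int)) : Decidable (Pre_getBricksThatCanBeRemoved supports rests_on) := by unfold Pre_getBricksThatCanBeRemoved; infer_instance
def pvWitness_getBricksThatCanBeRemoved : (List (Int × List Int)) × (List (Int × List Int)) :=
  ([(1, [2]), (2, [])], [(2, [1, 3])])

def Spec_getBricksThatCanBeRemoved (supports : List (Int × List Int)) (rests_on : List (Int × List Int)) (out : List Int) : Prop := out = getBricksThatCanBeRemoved_alt supports rests_on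
instance (supports : List (Int × List Int)) (rests_on : List (Int × List Int)) (out : List Int) : Decidable (Spec_getBricksThatCanBeRemoved supports rests_on out) := by unfold Spec_getBricksThatCanBeRemoved; infer_instance

-- ===== CLAIM (what is proved, stated in full; the proofs are below) =====
def Claim_equal_getBricksThatCanBeRemoved : Prop := ∀ (supports : List (Int × List Int)) (rests_on : List (Int × List Int)), Dom_getBricksThatCanBeRemoved supports rests_on → Pre_getBricksThatCanBeRemoved supports rests_on → Spec_getBricksThatCanBeRemoved supports rests_on (getBricksThatCanBeRemoved supports rests_on)

-- ===== LEMMAS AND PROOFS =====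

-- 'brick x rests on exactly one support' as A and B both read it off rests_on
def fragile (rd : PySem.Dict Int (List Int)) (x : Int) : Bool :=
  match rd.get? x with
  | some l => decide (l.length = 1)
  | none => false

-- A's inner loop over a support list, characterised
lemma inner_fold_eq (rd : PySem.Dict Int (List Int)) (s : List Int) (b : Bool) :
    s.foldl (fun remove supported =>
        match rd.get? supported with
        | some l => if l.length = 1 then false else remove
        | none => remove) b =
      (b && s.all (fun x => !fragile rd x)) := by
  induction s generalizing b with
  | nil => simp
  | cons x s ih =>
    simp only [List.foldl_cons, List.all_cons, ih, fragile]
    cases hx : rd.get? x with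
    | none => simp
    | some l => by_cases h : l.length = 1 <;> simp [h]

-- the double fold building the reverse index, flattened to a single fold
lemma sb_eq_flat (items : List (Int × List Int)) (d : PySem.Dict Int (List Int)) :
    items.foldl (fun d p => p.2.foldl (fun d x => d.modify x [] (· ++ [p.1])) d) d
      = (items.flatMap (fun p => p.2.map (fun x => (x, p.1)))).foldl
          (fun d q => d.modify q.1 [] (· ++ [q.2])) d := by
  induction items generalizing d with
  | nil => simp
  | cons p items ih =>
    simp only [List.foldl_cons, List.flatMap_cons, List.foldl_append, List.foldl_map, ih]

-- membership in a bucket of the reverse index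
lemma mem_bucket (items : List (Int × List Int)) (x y : Int) :
    y ∈ (items.foldl (fun d p => p.2.foldl (fun d x => d.modify x [] (· ++ [p.1])) d)
          PySem.Dict.empty).getD x [] ↔ ∃ p ∈ items, p.1 = y ∧ x ∈ p.2 := by
  rw [sb_eq_flat, PySem.Dict.getD_foldl_modify_append]
  simp [List.mem_filter]

-- the reverse index has distinct keys
lemma nodup_keys_sb (items : List (Int × List Int)) :
    (items.foldl (fun d p => p.2.foldl (fun d x => d.modify x [] (· ++ [p.1])) d)
      PySem.Dict.empty).keys.Nodup := by
  rw [sb_eq_flat]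
  exact PySem.Dict.nodup_keys_foldl_modify_key
    (items.flatMap (fun p => p.2.map (fun x => (x, p.1)))) (fun q => q.1) []
    (fun (_ : PySem.Dict Int (List Int)) (q : Int × Int) (v : List Int) => v ++ [q.2])
    PySem.Dict.empty PySem.Dict.nodup_keys_empty

-- membership in B's critical-set loop
lemma mem_critfold (rd : PySem.Dict Int (List Int)) (qs : List (Int × List Int))
    (c0 : List Int) (y : Int) :
    y ∈ qs.foldl (fun crit q =>
          match rd.get? q.1 with
          | some l => if l.length = 1 then PySem.Set.update crit q.2 else crit
          | none => crit) c0 ↔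
      y ∈ c0 ∨ ∃ q ∈ qs, fragile rd q.1 = true ∧ y ∈ q.2 := by
  induction qs generalizing c0 with
  | nil => simp
  | cons q qs ih =>
    simp only [List.foldl_cons, ih, List.mem_cons, fragile]
    cases hq : rd.get? q.1 with
    | none =>
      constructor
      · rintro (h | ⟨q', h1, h2⟩)
        · exact .inl h
        · exact .inr ⟨q', .inr h1, h2⟩
      · rintro (h | ⟨q', (rfl | h1), h2, h3⟩)
        · exact .inl h
        · rw [hq] at h2; cases h2
        · exact .inr ⟨q', h1, h2, h3⟩
    | some l =>
      by_cases h1 : l.length = 1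
      · simp only [if_pos h1, PySem.Set.mem_update]
        constructor
        · rintro (⟨h | h⟩ | ⟨q', h2, h3⟩)
          · exact .inl h
          · exact .inr ⟨q, .inl rfl, by simp [hq, h1], h⟩
          · exact .inr ⟨q', .inr h2, h3⟩
        · rintro (h | ⟨q', (rfl | h2), h3, h4⟩)
          · exact .inl (.inl h)
          · exact .inl (.inr h4)
          · exact .inr ⟨q', h2, h3, h4⟩
      · simp only [if_neg h1]
        constructor
        · rintro (h | ⟨q', h2, h3⟩)
          · exact .inl h
          · exact .inr ⟨q', .inr h2, h3⟩
        · rintro (h | ⟨q', (rfl | h2), h3, h4⟩)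
          · exact .inl h
          · rw [hq] at h3; simp [h1] at h3
          · exact .inr ⟨q', h2, h3, h4⟩

-- membership in B's critical set, phrased over the original items list
lemma mem_critical (rd : PySem.Dict Int (List Int)) (items : List (Int × List Int)) (y : Int) :
    (y ∈ ((items.foldl (fun d p => p.2.foldl (fun d x => d.modify x [] (· ++ [p.1])) d)
            PySem.Dict.empty).items.foldl
          (fun crit q =>
            match rd.get? q.1 with
            | some l => if l.length = 1 then PySem.Set.update crit q.2 else crit
            | none => crit) ([] : List Int))) ↔
      ∃ p ∈ items, p.1 = y ∧ ∃ x ∈ p.2, fragile rd x = true := by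
  rw [mem_critfold]
  simp only [List.not_mem_nil, false_or]
  set sb := items.foldl (fun d p => p.2.foldl (fun d x => d.modify x [] (· ++ [p.1])) d)
    PySem.Dict.empty with hsb
  have hnd : sb.keys.Nodup := nodup_keys_sb items
  constructor
  · rintro ⟨q, hq, hfr, hy⟩
    have hg : sb.getD q.1 [] = q.2 :=
      PySem.Dict.getD_of_mem_items sb (by simpa using hq) hnd []
    have : y ∈ sb.getD q.1 [] := hg ▸ hy
    rw [hsb, mem_bucket] at this
    obtain ⟨p, hp, rfl, hx⟩ := this
    exact ⟨p, hp, rfl, q.1, hx, hfr⟩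
  · rintro ⟨p, hp, rfl, x, hx, hfr⟩
    have hy : p.1 ∈ sb.getD x [] := by
      rw [hsb, mem_bucket]; exact ⟨p, hp, rfl, hx⟩
    cases hc : sb.contains x with
    | false => rw [PySem.Dict.getD_of_not_contains sb [] hc] at hy; cases hy
    | true =>
      have hsome : (sb.get? x).isSome := by rw [← PySem.Dict.contains_eq_isSome_get? sb x, hc]
      obtain ⟨l, hl⟩ := Option.isSome_iff_exists.mp hsome
      refine ⟨(x, l), PySem.Dict.mem_items_of_get?_eq_some sb hl, hfr, ?_⟩
      rwa [PySem.Dict.getD_of_get?_eq_some sb [] hl] at hy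
  
-- A's accumulation over items with fresh distinct keys, as a filter
lemma foldl_add_filter (items : List (Int × List Int)) (g : Int × List Int → Bool)
    (s : List Int) (hs : ∀ p ∈ items, p.1 ∉ s) (hn : (items.map (·.1)).Nodup) :
    items.foldl (fun s p => if g p then PySem.Set.add s p.1 else s) s
      = s ++ (items.filter g).map (·.1) := by
  induction items generalizing s with
  | nil => simp
  | cons p items ih =>
    simp only [List.map_cons, List.nodup_cons, List.mem_map] at hn
    obtain ⟨hp1, hn'⟩ := hn
    simp only [List.foldl_cons, List.filter_cons]
    by_cases hg : g p
    · rw [if_pos hg, if_pos hg, PySem.Set.add_of_not_mem (hs p (.head _)),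
        ih _ (fun q hq => by
          simp only [List.mem_append, List.mem_singleton]
          rintro (h | h)
          · exact hs q (.tail _ hq) h
          · exact hp1 ⟨q, hq, h⟩) hn']
      simp
    · rw [if_neg hg, if_neg hg, ih _ (fun q hq => hs q (.tail _ hq)) hn']

-- two items of a Nodup-keyed dict with the same key have the same value
lemma eq_snd_of_items (d : PySem.Dict Int (List Int)) (hnd : d.keys.Nodup)
    (p q : Int × List Int) (hp : p ∈ d.items) (hq : q ∈ d.items) (h : p.1 = q.1) : p.2 = q.2 := by
  have h1 := PySem.Dict.get?_of_mem_items d (k := p.1) (v := p.2) (by simpa using hp) hnd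
  have h2 := PySem.Dict.get?_of_mem_items d (k := q.1) (v := q.2) (by simpa using hq) hnd
  rw [h, h2] at h1
  exact (Option.some.injEq _ _).mp h1.symm

-- ===== VERDICT (by name: the statement is the Claim_ definition above) =====
theorem getBricksThatCanBeRemoved_spec : Claim_equal_getBricksThatCanBeRemoved := by
  intro supports rests_on _ _
  show getBricksThatCanBeRemoved supports rests_on = getBricksThatCanBeRemoved_alt supports rests_on
  simp only [getBricksThatCanBeRemoved, getBricksThatCanBeRemoved_alt]
  have hnd : (PySem.Dict.ofList supports).keys.Nodup := PySem.Dict.nodup_keys_ofList supports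
  have hnd' : ((PySem.Dict.ofList supports).items.map (·.1)).Nodup := by
    simpa [PySem.Dict.keys] using hnd
  -- left side: A's loop as a filter over the items
  rw [show (fun (can_be_removed : List Int) (p : Int × List Int) =>
        if p.2.foldl (fun remove supported =>
              match (PySem.Dict.ofList rests_on).get? supported with
              | some l => if l.length = 1 then false else remove
              | none => remove) true
        then PySem.Set.add can_be_removed p.1 else can_be_removed)
      = (fun (s : List Int) (p : Int × List Int) =>
          if p.2.all (fun x => !fragile (PySem.Dict.ofList rests_on) x)
          then PySem.Set.add s p.1 else s) from by
    funext s p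
    rw [inner_fold_eq]
    simp]
  rw [foldl_add_filter _ _ _ (by simp [PySem.Set.empty]) hnd']
  -- right side: the set difference as a filter over the items
  rw [PySem.Set.ofList_eq_self_of_nodup _ hnd]
  simp only [PySem.Set.diff, PySem.Dict.keys, List.filter_map]
  simp only [PySem.Set.empty, List.nil_append]
  -- the two filters agree pointwise on the items
  refine congrArg (List.map (fun x : Int × List Int => x.1)) (List.filter_congr ?_)
  intro p hp
  simp only [Function.comp]
  rw [Bool.eq_iff_iff]
  simp only [List.all_eq_true, Bool.not_eq_eq_eq_not, Bool.not_true,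
    PySem.Set.contains_eq_listContains, List.contains_eq_mem, decide_eq_false_iff_not]
  rw [mem_critical]
  constructor
  · rintro h ⟨q, hq, hq1, x, hx, hfr⟩
    have := eq_snd_of_items _ hnd q p hq hp hq1
    exact absurd (h x (this ▸ hx)) (by simp [hfr])
  · intro h x hx
    by_contra hfr
    exact h ⟨p, hp, rfl, x, hx, by simpa using hfr⟩
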